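-- pv_equiv track=rewrite | github.com/duncan020313/objdump | instrumentation/diff.py | _build_ranges_from_lines
-- ===== SOURCE A (Python) =====
-- from typing import Dict, List, Tuple
--
-- def _build_ranges_from_lines(changed_lines: List[int]) -> List[Tuple[int, int]]:
--     """Build contiguous ranges from a list of line numbers."""
--     if not changed_lines:
--         return []
--
--     changed_lines.sort()
--     ranges = []
--     start = changed_lines[0]
--     end = start
--
--     for line in changed_lines[1:]:
--         if line == end + 1:
--             # Contiguous line
--             end = line
--         else:
--             # Gap found, close current range and start new one
--             ranges.append((start, end))
--             start = line
--             end = line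
--
--     # Add the last range
--     ranges.append((start, end))
--     return ranges
-- ===== SOURCE B (Python) =====
-- from itertools import groupby
-- from typing import List, Tuple
--
-- def _build_ranges_from_lines(changed_lines: List[int]) -> List[Tuple[int, int]]:
--     """Build contiguous ranges from a list of line numbers."""
--     if not changed_lines:
--         return []
--     changed_lines.sort()
--     ranges = []
--     for _, grp in groupby(enumerate(changed_lines), key=lambda iv: iv[1] - iv[0]):
--         vals = [v for _, v in grp]
--         ranges.append((vals[0], vals[-1]))
--     return ranges
-- ===== Notes on version B (the rewrite author's own statement) =====
-- stated objective: idiomatic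
-- what changed: Replaces the hand-rolled start/end gap-detection loop with the standard itertools.groupby consecutive-run idiom keyed on value minus index; the in-place sort and empty guard are kept.
import Mathlib
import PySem

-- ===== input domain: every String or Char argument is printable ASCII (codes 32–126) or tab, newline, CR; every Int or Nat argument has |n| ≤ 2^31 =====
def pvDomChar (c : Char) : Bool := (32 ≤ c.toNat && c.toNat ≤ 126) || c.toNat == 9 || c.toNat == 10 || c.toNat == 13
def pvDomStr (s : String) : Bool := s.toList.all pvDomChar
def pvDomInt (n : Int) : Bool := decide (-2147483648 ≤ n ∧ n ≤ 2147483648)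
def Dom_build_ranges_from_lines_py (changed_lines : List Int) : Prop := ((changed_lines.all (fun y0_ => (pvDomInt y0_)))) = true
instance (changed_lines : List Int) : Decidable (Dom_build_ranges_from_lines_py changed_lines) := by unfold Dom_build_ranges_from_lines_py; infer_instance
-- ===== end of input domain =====

-- B replaces A's hand-rolled start/end gap-detection loop with the itertools.groupby
-- consecutive-run idiom (key = value - index); return values proved equal; both A and B
-- sort the argument in place in Python (equivalence here is about the return value).
-- ===== PORT A =====
def pvALoop (ranges : List (Int × Int)) (start e : Int) : List Int → List (Int × Int)
  | [] => ranges ++ [(start, e)]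
  | line :: rest =>
    if line = e + 1 then pvALoop ranges start line rest
    else pvALoop (ranges ++ [(start, e)]) line line rest

def build_ranges_from_lines_py (changed_lines : List Int) : List (Int × Int) :=
  match changed_lines with
  | [] => []
  | _ :: _ =>
    match PySem.List.sorted changed_lines (fun x => x) false with
    | [] => []
    | s0 :: rest => pvALoop [] s0 s0 rest

-- ===== PORT B =====
def pvGrp (k : Int) (cur : List Int) : List (Int × Int) → List (List Int)
  | [] => [cur.reverse]
  | (i, v) :: rest =>
    if v - i = k then pvGrp k (v :: cur) rest
    else cur.reverse :: pvGrp (v - i) [v] rest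

def build_ranges_from_lines_py_alt (changed_lines : List Int) : List (Int × Int) :=
  match changed_lines with
  | [] => []
  | _ :: _ =>
    match PySem.List.enumerate (PySem.List.sorted changed_lines (fun x => x) false) 0 with
    | [] => []
    | (i, v) :: rest =>
      (pvGrp (v - i) [v] rest).map (fun g => (g.headD 0, g.getLastD 0))

-- ===== PRECONDITION & SPEC =====
def Spec_build_ranges_from_lines_py (changed_lines : List Int) (out : List (Int × Int)) : Prop := out = build_ranges_from_lines_py_alt changed_lines
instance (changed_lines : List Int) (out : List (Int × Int)) : Decidable (Spec_build_ranges_from_lines_py changed_lines out) := by unfold Spec_build_ranges_from_lines_py; infer_instance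

-- ===== CLAIM (what is proved, stated in full; the proofs are below) =====
def Claim_equal_build_ranges_from_lines_py : Prop := ∀ (changed_lines : List Int), Dom_build_ranges_from_lines_py changed_lines → Spec_build_ranges_from_lines_py changed_lines (build_ranges_from_lines_py changed_lines)

-- ===== LEMMAS AND PROOFS =====
theorem pvHeadDRev (l : List Int) : l.reverse.headD 0 = l.getLastD 0 := by
  cases h : l.getLast? with
  | none => simp_all [List.getLast?_eq_none_iff]
  | some a => simp [List.getLastD_eq_getLast?, h, List.head?_reverse]

theorem pvLastDRev (l : List Int) : l.reverse.getLastD 0 = l.headD 0 := by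
  have := pvHeadDRev l.reverse
  simpa using this.symm

theorem pvALoop_acc (ranges : List (Int × Int)) (start e : Int) (vs : List Int) :
    pvALoop ranges start e vs = ranges ++ pvALoop [] start e vs := by
  induction vs generalizing ranges start e with
  | nil => simp [pvALoop]
  | cons v vs ih =>
    by_cases h : v = e + 1
    · simp only [pvALoop, if_pos h]; rw [ih]
    · simp only [pvALoop, if_neg h]
      rw [ih, ih (ranges := [] ++ [(start, e)])]
      simp

theorem pvGrp_eq_aLoop (vs : List Int) (i k : Int) (cur : List Int)
    (hne : cur ≠ []) (hhd : cur.headD 0 = k + i - 1) :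
    (pvGrp k cur (PySem.List.enumerate vs i)).map (fun g => (g.headD 0, g.getLastD 0))
      = pvALoop [] (cur.getLastD 0) (k + i - 1) vs := by
  induction vs generalizing i k cur with
  | nil =>
    simp only [PySem.List.enumerate_nil, pvGrp, pvALoop, List.map_cons, List.map_nil,
      List.nil_append, pvHeadDRev, pvLastDRev, hhd]
  | cons v vs ih =>
    rw [PySem.List.enumerate_cons]
    by_cases h : v - i = k
    · have he : k + i - 1 + 1 = v := by omega
      simp only [pvGrp, if_pos h, pvALoop, if_pos he.symm]
      have hc : (v :: cur).getLastD 0 = cur.getLastD 0 := by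
        cases cur with
        | nil => exact absurd rfl hne
        | cons a t => simp
      have := ih (i + 1) k (v :: cur) (by simp) (by simp; omega)
      rw [this, hc]
      congr 1
      omega
    · have hne' : ¬ v = k + i - 1 + 1 := by omega
      simp only [pvGrp, if_neg h, pvALoop, if_neg hne', List.map_cons]
      rw [pvALoop_acc]
      have := ih (i + 1) (v - i) [v] (by simp) (by simp; omega)
      rw [this]
      have h1 : v - i + (i + 1) - 1 = v := by omega
      rw [h1]
      rw [pvHeadDRev, pvLastDRev, hhd]
      simp

-- ===== VERDICT (by name: the statement is the Claim_ definition above) =====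
theorem build_ranges_from_lines_py_spec : Claim_equal_build_ranges_from_lines_py := by
  intro changed_lines _
  unfold Spec_build_ranges_from_lines_py
  unfold build_ranges_from_lines_py build_ranges_from_lines_py_alt
  cases changed_lines with
  | nil => rfl
  | cons c ct =>
    dsimp only
    cases hs : PySem.List.sorted (c :: ct) (fun x => x) false with
    | nil => simp [PySem.List.sorted_eq_nil_iff] at hs
    | cons s0 rest =>
      rw [PySem.List.enumerate_cons]
      dsimp only
      have := pvGrp_eq_aLoop rest (0 + 1) (s0 - 0) [s0] (by simp) (by simp)
      rw [this]
      have h1 : s0 - 0 + (0 + 1) - 1 = s0 := by omega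
      rw [h1]
      simp
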